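-- pv_equiv track=rewrite | github.com/sabuhamd/leetcode | HackerRank_Qs/max_upper_Quadrant.py | maximize_upper_left_quadrant
-- ===== SOURCE A (Python) =====
-- def maximize_upper_left_quadrant(matrix):
--     n = len(matrix) // 2  # Determine the size of n
--
--     # Function to compute the sum of the upper-left n x n quadrant
--     def quadrant_sum(mat):
--         return sum(mat[i][j] for i in range(n) for j in range(n))
--
--     max_sum = float('-inf')  # Initialize maximum sum
--     size = len(matrix)  # Full size of the matrix
--
--     # Iterate through all row and column reversal combinations
--     for row_flip in [False, True]:
--         for col_flip in [False, True]:
--             # Make a copy of the matrix for transformation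
--             temp_matrix = [row[:] for row in matrix]
--
--             # Reverse rows if needed
--             if row_flip:
--                 temp_matrix = temp_matrix[::-1]
--
--             # Reverse columns if needed
--             if col_flip:
--                 temp_matrix = [row[::-1] for row in temp_matrix]
--
--             # Calculate the sum of the upper-left quadrant
--             current_sum = quadrant_sum(temp_matrix)
--
--             # Update maximum sum
--             max_sum = max(max_sum, current_sum)
--
--     return max_sum
-- ===== SOURCE B (Python) =====
-- def maximize_upper_left_quadrant(matrix):
--     # Single pass with per-row prefix sums: each row contributes its first-n and
--     # last-n sums (O(1) from the prefix array) to top or bottom accumulators;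
--     # no flipped copies of the matrix are ever built.
--     size = len(matrix)
--     n = size // 2
--     tl = tr = bl = br = 0
--     for i, row in enumerate(matrix):
--         if n <= i < size - n:
--             continue  # middle row (odd size): used by no orientation
--         pre = [0]
--         for x in row:
--             pre.append(pre[-1] + x)
--         left = pre[n]
--         right = pre[-1] - pre[len(row) - n]
--         if i < n:
--             tl += left
--             tr += right
--         else:
--             bl += left
--             br += right
--     return max(tl, tr, bl, br)
-- ===== Notes on version B (the rewrite author's own statement) =====
-- stated objective: alternative
-- what changed: A builds four flipped copies of the matrix and sums the upper-left quadrant of each; B makes a single pass over the rows, computes each relevant row's first-n and last-n sums in O(1) from a per-row prefix-sum array, accumulates them into four corner totals (skipping middle rows), and returns their max.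
import Mathlib
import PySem

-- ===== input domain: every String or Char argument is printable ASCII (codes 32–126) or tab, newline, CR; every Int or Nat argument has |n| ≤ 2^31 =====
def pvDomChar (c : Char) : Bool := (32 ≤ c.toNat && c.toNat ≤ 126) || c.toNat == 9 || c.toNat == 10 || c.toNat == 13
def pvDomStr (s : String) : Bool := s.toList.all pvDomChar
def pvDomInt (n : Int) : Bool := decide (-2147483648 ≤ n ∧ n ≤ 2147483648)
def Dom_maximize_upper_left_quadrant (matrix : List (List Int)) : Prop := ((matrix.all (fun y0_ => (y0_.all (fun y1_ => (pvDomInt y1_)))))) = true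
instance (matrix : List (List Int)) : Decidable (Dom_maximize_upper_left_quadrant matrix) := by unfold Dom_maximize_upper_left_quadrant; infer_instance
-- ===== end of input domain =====

-- B replaces A's four copy-reverse-and-sum passes by ONE pass over the rows with
-- per-row prefix sums feeding four corner accumulators (objective: alternative).

-- ===== PORT A =====
-- quadrant_sum: sum(mat[i][j] for i in range(n) for j in range(n)); indices are
-- in range on every admitted input (Pre_), so getD's default is never taken.
def pvQuadSum (n : Nat) (mat : List (List Int)) : Int :=
  (List.range n).foldl (fun acc i =>
    (List.range n).foldl (fun acc2 j => acc2 + ((mat.getD i []).getD j 0)) acc) 0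

def maximize_upper_left_quadrant (matrix : List (List Int)) : Int :=
  let n := matrix.length / 2
  -- max_sum = float('-inf') is modelled as `none`; the loop always runs 4 times
  let res : Option Int := [false, true].foldl (fun m row_flip =>
      [false, true].foldl (fun m col_flip =>
        let temp0 := matrix.map (fun r => r)                       -- [row[:] for row in matrix]
        let temp1 := if row_flip then temp0.reverse else temp0     -- temp_matrix[::-1]
        let temp2 := if col_flip then temp1.map List.reverse else temp1  -- [row[::-1] for row …]
        let s := pvQuadSum n temp2
        some (match m with | none => s | some v => max v s)) m) none
  res.getD 0

-- ===== PORT B =====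
-- pre = [0]; for x in row: pre.append(pre[-1] + x)
def pvPre (row : List Int) : List Int :=
  row.foldl (fun pre x => pre ++ [PySem.List.pyGetD pre (-1) 0 + x]) [0]

def maximize_upper_left_quadrant_alt (matrix : List (List Int)) : Int :=
  let size := matrix.length
  let n := size / 2
  let st := (PySem.List.enumerate matrix).foldl
    (fun (s : Int × Int × Int × Int) (p : Int × List Int) =>
      if (n : Int) ≤ p.1 ∧ p.1 < (size : Int) - (n : Int) then s  -- middle row: skip
      else
        let pre := pvPre p.2
        let left := PySem.List.pyGetD pre (n : Int) 0
        let right := PySem.List.pyGetD pre (-1) 0 -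
                     PySem.List.pyGetD pre ((p.2.length : Int) - (n : Int)) 0
        if p.1 < (n : Int) then (s.1 + left, s.2.1 + right, s.2.2.1, s.2.2.2)
        else (s.1, s.2.1, s.2.2.1 + left, s.2.2.2 + right))
    (0, 0, 0, 0)
  max (max (max st.1 st.2.1) st.2.2.1) st.2.2.2

-- ===== PRECONDITION & SPEC =====
-- A raises IndexError when some accessed row (among the first n and last n,
-- n = len(matrix)//2) is shorter than n; Pre_ excludes exactly those inputs.
def Pre_maximize_upper_left_quadrant (matrix : List (List Int)) : Prop :=
  ∀ i ∈ List.range (matrix.length / 2),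
    matrix.length / 2 ≤ (matrix.getD i []).length ∧
    matrix.length / 2 ≤ (matrix.getD (matrix.length - 1 - i) []).length
instance (matrix : List (List Int)) : Decidable (Pre_maximize_upper_left_quadrant matrix) := by
  unfold Pre_maximize_upper_left_quadrant; infer_instance

def pvWitness_maximize_upper_left_quadrant : List (List Int) := [[1, 2], [3, 4]]

def Spec_maximize_upper_left_quadrant (matrix : List (List Int)) (out : Int) : Prop := out = maximize_upper_left_quadrant_alt matrix
instance (matrix : List (List Int)) (out : Int) : Decidable (Spec_maximize_upper_left_quadrant matrix out) := by unfold Spec_maximize_upper_left_quadrant; infer_instance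

-- ===== CLAIM (what is proved, stated in full; the proofs are below) =====
def Claim_equal_maximize_upper_left_quadrant : Prop := ∀ (matrix : List (List Int)), Dom_maximize_upper_left_quadrant matrix → Pre_maximize_upper_left_quadrant matrix → Spec_maximize_upper_left_quadrant matrix (maximize_upper_left_quadrant matrix)

-- ===== LEMMAS AND PROOFS =====

-- corner sums of the original matrix, the common form both ports are reduced to
def pvTakeSum (n : Nat) (row : List Int) : Int := (row.take n).sum
def pvDropSum (n : Nat) (row : List Int) : Int := (row.drop (row.length - n)).sum

-- ---- generic index/reverse facts ----
theorem pv_getD_map_reverse (l : List (List Int)) (i : Nat) (h : i < l.length) :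
    (l.map List.reverse).getD i [] = (l.getD i []).reverse := by
  simp [List.getD_eq_getElem?_getD, List.getElem?_map, List.getElem?_eq_getElem h]

theorem pv_getD_reverse (l : List (List Int)) (i : Nat) (h : i < l.length) :
    l.reverse.getD i [] = l.getD (l.length - 1 - i) [] := by
  have h' : l.length - 1 - i < l.length := by omega
  simp [List.getD_eq_getElem?_getD, List.getElem?_reverse h, List.getElem?_eq_getElem h']

theorem pv_row_reverse_getD (row : List Int) (j : Nat) (h : j < row.length) :
    row.reverse.getD j 0 = row.getD (row.length - 1 - j) 0 := by
  have h' : row.length - 1 - j < row.length := by omega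
  simp [List.getD_eq_getElem?_getD, List.getElem?_reverse h, List.getElem?_eq_getElem h']

-- ---- range-indexed sums are take/drop sums ----
theorem pv_range_sum_take (n : Nat) (row : List Int) (h : n ≤ row.length) :
    ((List.range n).map (fun j => row.getD j 0)).sum = (row.take n).sum := by
  congr 1
  apply List.ext_getElem
  · simp [Nat.min_eq_left h]
  intro k hk _
  simp only [List.length_map, List.length_range] at hk
  have hlt : k < row.length := lt_of_lt_of_le hk h
  simp [List.getD_eq_getElem?_getD, List.getElem?_eq_getElem hlt]

theorem pv_range_sum_drop (n : Nat) (row : List Int) (h : n ≤ row.length) :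
    ((List.range n).map (fun j => row.getD (row.length - 1 - j) 0)).sum
      = (row.drop (row.length - n)).sum := by
  have hlist : (List.range n).map (fun j => row.getD (row.length - 1 - j) 0)
      = (row.drop (row.length - n)).reverse := by
    apply List.ext_getElem
    · simp only [List.length_map, List.length_range, List.length_reverse, List.length_drop]
      omega
    intro k hk1 hk2
    simp only [List.length_map, List.length_range] at hk1
    have h1 : row.length - 1 - k < row.length := by omega
    simp [List.getElem_reverse, List.getD_eq_getElem?_getD, List.getElem?_eq_getElem h1]
    have he : row.length - 1 - k
        = row.length - n + (row.length - (row.length - n) - 1 - k) := by omega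
    simp only [he]
  rw [hlist, List.sum_reverse]

-- ---- range-indexed row maps are take/drop row maps ----
theorem pv_map_range_take (F : List Int → Int) (n : Nat) (mat : List (List Int))
    (h : n ≤ mat.length) :
    (List.range n).map (fun i => F (mat.getD i [])) = (mat.take n).map F := by
  apply List.ext_getElem
  · simp [Nat.min_eq_left h]
  intro k hk _
  simp only [List.length_map, List.length_range] at hk
  have hlt : k < mat.length := lt_of_lt_of_le hk h
  simp [List.getD_eq_getElem?_getD, List.getElem?_eq_getElem hlt]

theorem pv_map_range_drop (F : List Int → Int) (n : Nat) (mat : List (List Int))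
    (h : n ≤ mat.length) :
    (List.range n).map (fun i => F (mat.getD (mat.length - 1 - i) []))
      = ((mat.drop (mat.length - n)).map F).reverse := by
  apply List.ext_getElem
  · simp only [List.length_map, List.length_range, List.length_reverse, List.length_drop]
    omega
  intro k hk1 hk2
  simp only [List.length_map, List.length_range] at hk1
  have h1 : mat.length - 1 - k < mat.length := by omega
  simp [List.getElem_reverse, List.getD_eq_getElem?_getD, List.getElem?_eq_getElem h1]
  have he : mat.length - 1 - k
      = mat.length - n + (mat.length - (mat.length - n) - 1 - k) := by omega
  simp only [he]

-- ---- A side: pvQuadSum as a sum of row sums ----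
theorem pv_quad_sum_eq (n : Nat) (mat : List (List Int)) :
    pvQuadSum n mat =
      ((List.range n).map (fun i =>
        ((List.range n).map (fun j => (mat.getD i []).getD j 0)).sum)).sum := by
  unfold pvQuadSum
  rw [PySem.List.foldl_congr_mem (List.range n) _
    (fun acc i => acc + ((List.range n).map (fun j => (mat.getD i []).getD j 0)).sum) 0
    (fun acc i _ => PySem.List.foldl_add _ _ _)]
  rw [PySem.List.foldl_add]
  ring

-- ---- Pre_ facts about rows in the two corner bands ----
theorem pv_pre_take (matrix : List (List Int)) (hp : Pre_maximize_upper_left_quadrant matrix)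
    (row : List Int) (hm : row ∈ matrix.take (matrix.length / 2)) :
    matrix.length / 2 ≤ row.length := by
  obtain ⟨k, hk, hEq⟩ := List.getElem_of_mem hm
  have hk' : k < matrix.length / 2 := by
    have := hk; simp [List.length_take] at this; omega
  have hkl : k < matrix.length := lt_of_lt_of_le hk' (Nat.div_le_self _ _)
  have : row = matrix.getD k [] := by
    rw [← hEq, List.getElem_take, List.getD_eq_getElem?_getD, List.getElem?_eq_getElem hkl]
    rfl
  rw [this]
  exact (hp k (List.mem_range.mpr hk')).1

theorem pv_pre_drop (matrix : List (List Int)) (hp : Pre_maximize_upper_left_quadrant matrix)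
    (row : List Int) (hm : row ∈ matrix.drop (matrix.length - matrix.length / 2)) :
    matrix.length / 2 ≤ row.length := by
  obtain ⟨k, hk, hEq⟩ := List.getElem_of_mem hm
  have hk' : k < matrix.length / 2 := by
    have := hk; simp [List.length_drop] at this; omega
  have hkl : matrix.length - matrix.length / 2 + k < matrix.length := by omega
  have hidx : matrix.length - 1 - (matrix.length / 2 - 1 - k)
      = matrix.length - matrix.length / 2 + k := by omega
  have : row = matrix.getD (matrix.length - 1 - (matrix.length / 2 - 1 - k)) [] := by
    rw [← hEq, List.getElem_drop, hidx, List.getD_eq_getElem?_getD,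
      List.getElem?_eq_getElem hkl]
    rfl
  rw [this]
  exact (hp (matrix.length / 2 - 1 - k) (List.mem_range.mpr (by omega))).2

-- ---- A side: the four flipped quadrant sums are the four corner sums ----
theorem pv_corner_ff (matrix : List (List Int)) (hp : Pre_maximize_upper_left_quadrant matrix) :
    pvQuadSum (matrix.length / 2) (matrix.map (fun r => r))
      = ((matrix.take (matrix.length / 2)).map (pvTakeSum (matrix.length / 2))).sum := by
  rw [List.map_id', pv_quad_sum_eq,
    ← pv_map_range_take (pvTakeSum (matrix.length / 2)) _ _ (Nat.div_le_self _ _)]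
  congr 1
  apply List.map_congr_left
  intro i hi
  simp only [List.mem_range] at hi
  exact pv_range_sum_take _ _ ((hp i (List.mem_range.mpr hi)).1)

theorem pv_corner_ft (matrix : List (List Int)) (hp : Pre_maximize_upper_left_quadrant matrix) :
    pvQuadSum (matrix.length / 2) ((matrix.map (fun r => r)).map List.reverse)
      = ((matrix.take (matrix.length / 2)).map (pvDropSum (matrix.length / 2))).sum := by
  rw [List.map_id', pv_quad_sum_eq,
    ← pv_map_range_take (pvDropSum (matrix.length / 2)) _ _ (Nat.div_le_self _ _)]
  congr 1
  apply List.map_congr_left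
  intro i hi
  simp only [List.mem_range] at hi
  have hil : i < matrix.length := lt_of_lt_of_le hi (Nat.div_le_self _ _)
  have hrow := (hp i (List.mem_range.mpr hi)).1
  calc ((List.range (matrix.length / 2)).map
          (fun j => ((matrix.map List.reverse).getD i []).getD j 0)).sum
      = ((List.range (matrix.length / 2)).map
          (fun j => (matrix.getD i []).getD ((matrix.getD i []).length - 1 - j) 0)).sum := by
        apply congrArg
        apply List.map_congr_left
        intro j hj
        simp only [List.mem_range] at hj
        rw [pv_getD_map_reverse _ _ hil, pv_row_reverse_getD _ _ (lt_of_lt_of_le hj hrow)]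
    _ = pvDropSum (matrix.length / 2) (matrix.getD i []) :=
        pv_range_sum_drop _ _ hrow

theorem pv_corner_tf (matrix : List (List Int)) (hp : Pre_maximize_upper_left_quadrant matrix) :
    pvQuadSum (matrix.length / 2) (matrix.map (fun r => r)).reverse
      = ((matrix.drop (matrix.length - matrix.length / 2)).map
          (pvTakeSum (matrix.length / 2))).sum := by
  rw [List.map_id', pv_quad_sum_eq]
  have hmap : (List.range (matrix.length / 2)).map (fun i =>
      ((List.range (matrix.length / 2)).map (fun j => (matrix.reverse.getD i []).getD j 0)).sum)
    = (List.range (matrix.length / 2)).map (fun i =>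
        pvTakeSum (matrix.length / 2) (matrix.getD (matrix.length - 1 - i) [])) := by
    apply List.map_congr_left
    intro i hi
    simp only [List.mem_range] at hi
    have hil : i < matrix.length := lt_of_lt_of_le hi (Nat.div_le_self _ _)
    rw [pv_getD_reverse _ _ hil]
    exact pv_range_sum_take _ _ ((hp i (List.mem_range.mpr hi)).2)
  rw [hmap, pv_map_range_drop (pvTakeSum (matrix.length / 2)) _ _ (Nat.div_le_self _ _),
    List.sum_reverse]

theorem pv_corner_tt (matrix : List (List Int)) (hp : Pre_maximize_upper_left_quadrant matrix) :
    pvQuadSum (matrix.length / 2) ((matrix.map (fun r => r)).reverse.map List.reverse)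
      = ((matrix.drop (matrix.length - matrix.length / 2)).map
          (pvDropSum (matrix.length / 2))).sum := by
  rw [List.map_id', pv_quad_sum_eq]
  have hmap : (List.range (matrix.length / 2)).map (fun i =>
      ((List.range (matrix.length / 2)).map
        (fun j => ((matrix.reverse.map List.reverse).getD i []).getD j 0)).sum)
    = (List.range (matrix.length / 2)).map (fun i =>
        pvDropSum (matrix.length / 2) (matrix.getD (matrix.length - 1 - i) [])) := by
    apply List.map_congr_left
    intro i hi
    simp only [List.mem_range] at hi
    have hil : i < matrix.length := lt_of_lt_of_le hi (Nat.div_le_self _ _)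
    have hil' : i < matrix.reverse.length := by simpa using hil
    have hrow := (hp i (List.mem_range.mpr hi)).2
    have hinner : ∀ j ∈ List.range (matrix.length / 2),
        ((matrix.reverse.map List.reverse).getD i []).getD j 0
          = (matrix.getD (matrix.length - 1 - i) []).getD
              ((matrix.getD (matrix.length - 1 - i) []).length - 1 - j) 0 := by
      intro j hj
      simp only [List.mem_range] at hj
      rw [pv_getD_map_reverse _ _ hil', pv_getD_reverse _ _ hil,
        pv_row_reverse_getD _ _ (lt_of_lt_of_le hj hrow)]
    rw [List.map_congr_left hinner]
    exact pv_range_sum_drop _ _ hrow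
  rw [hmap, pv_map_range_drop (pvDropSum (matrix.length / 2)) _ _ (Nat.div_le_self _ _),
    List.sum_reverse]

-- ---- B side: the prefix list and its entries ----
def pvScan (s : Int) : List Int → List Int
  | [] => []
  | x :: xs => (s + x) :: pvScan (s + x) xs

theorem pv_foldl_scan (row : List Int) : ∀ (acc : List Int) (h : acc ≠ []),
    row.foldl (fun pre x => pre ++ [PySem.List.pyGetD pre (-1) 0 + x]) acc
      = acc ++ pvScan (acc.getLast h) row := by
  induction row with
  | nil => intro acc h; simp [pvScan]
  | cons x xs ih =>
    intro acc h
    rw [List.foldl_cons, PySem.List.pyGetD_neg_one _ _ h,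
      ih (acc ++ [acc.getLast h + x]) (by simp)]
    simp [pvScan]

theorem pvPre_eq (row : List Int) : pvPre row = 0 :: pvScan 0 row := by
  unfold pvPre
  rw [pv_foldl_scan row [0] (by simp)]
  simp

theorem pvScan_length (row : List Int) : ∀ s : Int, (pvScan s row).length = row.length := by
  induction row with
  | nil => intro s; simp [pvScan]
  | cons x xs ih => intro s; simp [pvScan, ih]

theorem pvScan_getD (row : List Int) : ∀ (s : Int) (k : Nat), k < row.length →
    (pvScan s row).getD k 0 = s + (row.take (k + 1)).sum := by
  induction row with
  | nil => intro s k h; simp at h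
  | cons x xs ih =>
    intro s k h
    cases k with
    | zero => simp [pvScan]
    | succ j =>
      simp only [pvScan, List.getD_cons_succ, List.take_succ_cons, List.sum_cons]
      rw [ih (s + x) j (by simpa using h)]
      ring

theorem pvPre_getD (row : List Int) (k : Nat) (h : k ≤ row.length) :
    (pvPre row).getD k 0 = (row.take k).sum := by
  rw [pvPre_eq]
  cases k with
  | zero => simp
  | succ j =>
    simp only [List.getD_cons_succ]
    rw [pvScan_getD row 0 j (by omega)]
    simp

theorem pvPre_neg_one (row : List Int) :
    PySem.List.pyGetD (pvPre row) (-1) 0 = row.sum := by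
  have hne : pvPre row ≠ [] := by rw [pvPre_eq]; simp
  have hlen : (pvPre row).length = row.length + 1 := by
    rw [pvPre_eq]; simp [pvScan_length]
  have key : ∀ (l : List Int) (h : l ≠ []), l.getLast h = l.getD (l.length - 1) 0 := by
    intro l h
    have hlt : l.length - 1 < l.length := by
      have := List.length_pos_iff.mpr h; omega
    rw [List.getLast_eq_getElem, List.getD_eq_getElem?_getD, List.getElem?_eq_getElem hlt]
    rfl
  rw [PySem.List.pyGetD_neg_one _ _ hne, key _ hne, hlen, Nat.add_sub_cancel,
    pvPre_getD row row.length le_rfl, List.take_length]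

theorem pv_left_eval (n : Nat) (row : List Int) (h : n ≤ row.length) :
    PySem.List.pyGetD (pvPre row) (n : Int) 0 = pvTakeSum n row := by
  rw [PySem.List.pyGetD_natCast]
  exact pvPre_getD row n h

theorem pv_right_eval (n : Nat) (row : List Int) (h : n ≤ row.length) :
    PySem.List.pyGetD (pvPre row) (-1) 0
      - PySem.List.pyGetD (pvPre row) ((row.length : Int) - (n : Int)) 0
      = pvDropSum n row := by
  have hc : ((row.length : Int) - (n : Int)) = ((row.length - n : Nat) : Int) := by omega
  rw [pvPre_neg_one, hc, PySem.List.pyGetD_natCast,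
    pvPre_getD row (row.length - n) (by omega)]
  have := List.sum_take_add_sum_drop row (row.length - n)
  unfold pvDropSum
  linarith

-- ---- B side: the single fold computes the four corner sums ----
theorem pv_fold_eq (n size : Nat) (hns : n + n ≤ size) (rows : List (List Int)) :
    ∀ (j : Nat) (s : Int × Int × Int × Int),
    (PySem.List.enumerate rows (j : Int)).foldl
      (fun (s : Int × Int × Int × Int) (p : Int × List Int) =>
        if (n : Int) ≤ p.1 ∧ p.1 < (size : Int) - (n : Int) then s
        else
          let pre := pvPre p.2
          let left := PySem.List.pyGetD pre (n : Int) 0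
          let right := PySem.List.pyGetD pre (-1) 0 -
                       PySem.List.pyGetD pre ((p.2.length : Int) - (n : Int)) 0
          if p.1 < (n : Int) then (s.1 + left, s.2.1 + right, s.2.2.1, s.2.2.2)
          else (s.1, s.2.1, s.2.2.1 + left, s.2.2.2 + right)) s
    = (s.1 + ((rows.take (n - j)).map
          (fun row => PySem.List.pyGetD (pvPre row) (n : Int) 0)).sum,
       s.2.1 + ((rows.take (n - j)).map
          (fun row => PySem.List.pyGetD (pvPre row) (-1) 0 -
            PySem.List.pyGetD (pvPre row) ((row.length : Int) - (n : Int)) 0)).sum,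
       s.2.2.1 + ((rows.drop (size - n - j)).map
          (fun row => PySem.List.pyGetD (pvPre row) (n : Int) 0)).sum,
       s.2.2.2 + ((rows.drop (size - n - j)).map
          (fun row => PySem.List.pyGetD (pvPre row) (-1) 0 -
            PySem.List.pyGetD (pvPre row) ((row.length : Int) - (n : Int)) 0)).sum) := by
  induction rows with
  | nil => intro j s; simp
  | cons r t ih =>
    intro j s
    rw [PySem.List.enumerate_cons, List.foldl_cons]
    have hcast : ((j : Int) + 1) = ((j + 1 : Nat) : Int) := by push_cast; ring
    by_cases h1 : (n : Int) ≤ (j : Int) ∧ (j : Int) < (size : Int) - (n : Int)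
    · -- middle row: skipped
      have hj1 : n ≤ j := by exact_mod_cast h1.1
      have hj2 : j < size - n := by omega
      rw [if_pos h1, hcast, ih (j + 1) s]
      have ht : n - j = 0 := by omega
      have ht1 : n - (j + 1) = 0 := by omega
      have hd : size - n - j = (size - n - (j + 1)) + 1 := by omega
      rw [ht, ht1, hd]
      simp
    · rw [if_neg h1]
      by_cases h2 : (j : Int) < (n : Int)
      · -- top band
        have hj : j < n := by exact_mod_cast h2
        simp only [if_pos h2]
        rw [hcast, ih (j + 1) _]
        have ht : n - j = (n - (j + 1)) + 1 := by omega
        have hd : size - n - j = (size - n - (j + 1)) + 1 := by omega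
        rw [ht, hd]
        simp only [List.take_succ_cons, List.drop_succ_cons, List.map_cons, List.sum_cons]
        refine Prod.ext (by ring) (Prod.ext (by ring) (Prod.ext (by ring) (by ring)))
      · -- bottom band
        have hj : size - n ≤ j := by omega
        simp only [if_neg h2]
        rw [hcast, ih (j + 1) _]
        have ht : n - j = 0 := by omega
        have ht1 : n - (j + 1) = 0 := by omega
        have hd : size - n - j = 0 := by omega
        have hd1 : size - n - (j + 1) = 0 := by omega
        rw [ht, ht1, hd, hd1]
        simp only [List.take_zero, List.drop_zero, List.map_nil, List.sum_nil,
          List.map_cons, List.sum_cons]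
        refine Prod.ext (by ring) (Prod.ext (by ring) (Prod.ext (by ring) (by ring)))

-- ===== VERDICT (by name: the statement is the Claim_ definition above) =====
theorem maximize_upper_left_quadrant_spec : Claim_equal_maximize_upper_left_quadrant := by
  intro matrix _ hp
  unfold Spec_maximize_upper_left_quadrant
  -- evaluate A's 4-iteration loop
  have hA : maximize_upper_left_quadrant matrix
      = max (max (max
          (((matrix.take (matrix.length / 2)).map (pvTakeSum (matrix.length / 2))).sum)
          (((matrix.take (matrix.length / 2)).map (pvDropSum (matrix.length / 2))).sum))
          (((matrix.drop (matrix.length - matrix.length / 2)).map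
            (pvTakeSum (matrix.length / 2))).sum))
          (((matrix.drop (matrix.length - matrix.length / 2)).map
            (pvDropSum (matrix.length / 2))).sum) := by
    unfold maximize_upper_left_quadrant
    simp only [List.foldl, Bool.false_eq_true, ite_false, ite_true]
    rw [pv_corner_ff matrix hp, pv_corner_ft matrix hp, pv_corner_tf matrix hp,
      pv_corner_tt matrix hp]
    simp [Option.getD]
  -- evaluate B's single fold
  have hns : matrix.length / 2 + matrix.length / 2 ≤ matrix.length := by omega
  have hB := pv_fold_eq (matrix.length / 2) matrix.length hns matrix 0 (0, 0, 0, 0)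
  have hB0 : ((0 : Nat) : Int) = (0 : Int) := by norm_num
  rw [hB0] at hB
  have hBalt : maximize_upper_left_quadrant_alt matrix
      = max (max (max
          (((matrix.take (matrix.length / 2)).map (pvTakeSum (matrix.length / 2))).sum)
          (((matrix.take (matrix.length / 2)).map (pvDropSum (matrix.length / 2))).sum))
          (((matrix.drop (matrix.length - matrix.length / 2)).map
            (pvTakeSum (matrix.length / 2))).sum))
          (((matrix.drop (matrix.length - matrix.length / 2)).map
            (pvDropSum (matrix.length / 2))).sum) := by
    unfold maximize_upper_left_quadrant_alt
    simp only [hB, Nat.sub_zero, zero_add]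
    have hL : ∀ row ∈ matrix.take (matrix.length / 2),
        PySem.List.pyGetD (pvPre row) ((matrix.length / 2 : Nat) : Int) 0
          = pvTakeSum (matrix.length / 2) row :=
      fun row hm => pv_left_eval _ _ (pv_pre_take matrix hp row hm)
    have hR : ∀ row ∈ matrix.take (matrix.length / 2),
        PySem.List.pyGetD (pvPre row) (-1) 0 -
          PySem.List.pyGetD (pvPre row) ((row.length : Int) - ((matrix.length / 2 : Nat) : Int)) 0
          = pvDropSum (matrix.length / 2) row :=
      fun row hm => pv_right_eval _ _ (pv_pre_take matrix hp row hm)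
    have hL' : ∀ row ∈ matrix.drop (matrix.length - matrix.length / 2),
        PySem.List.pyGetD (pvPre row) ((matrix.length / 2 : Nat) : Int) 0
          = pvTakeSum (matrix.length / 2) row :=
      fun row hm => pv_left_eval _ _ (pv_pre_drop matrix hp row hm)
    have hR' : ∀ row ∈ matrix.drop (matrix.length - matrix.length / 2),
        PySem.List.pyGetD (pvPre row) (-1) 0 -
          PySem.List.pyGetD (pvPre row) ((row.length : Int) - ((matrix.length / 2 : Nat) : Int)) 0
          = pvDropSum (matrix.length / 2) row :=
      fun row hm => pv_right_eval _ _ (pv_pre_drop matrix hp row hm)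
    rw [List.map_congr_left hL, List.map_congr_left hR,
      List.map_congr_left hL', List.map_congr_left hR']
  rw [hA, hBalt]
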